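-- pv_equiv track=rewrite | github.com/LINDBURG/Programmers | codility/11_3.py | solution
-- ===== SOURCE A (Python) =====
-- from collections import defaultdict
-- import math
--
-- def solution(X, Y):
--     cnt = defaultdict(int)
--
--     max_i = ""
--     for x, y in zip(X, Y):
--         gcd = math.gcd(x,y)
--         line = str(x//gcd) + '+' + str(y//gcd)
--         cnt[line] += 1
--
--         if max_i == -1 or cnt[line] > cnt[max_i]:
--             max_i = line
--
--     return cnt[max_i]
-- ===== SOURCE B (Python) =====
-- import math
--
--
-- def solution(X, Y):
--     # Sort the reduced ratio keys, then find the longest run of equal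
--     # neighbours: no dictionary at all.
--     keys = []
--     for x, y in zip(X, Y):
--         g = math.gcd(x, y)
--         keys.append((x // g, y // g))
--     keys.sort()
--     best = 0
--     run = 0
--     prev = None
--     for k in keys:
--         run = run + 1 if k == prev else 1
--         prev = k
--         best = max(best, run)
--     return best
-- ===== Notes on version B (the rewrite author's own statement) =====
-- stated objective: alternative
-- what changed: B drops the dictionary entirely: it collects the reduced (x//g, y//g) tuples, sorts them, and returns the length of the longest run of equal adjacent keys found by a single scan, instead of A's hash-counting with inline running-argmax over string-concatenated keys.
import Mathlib
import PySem

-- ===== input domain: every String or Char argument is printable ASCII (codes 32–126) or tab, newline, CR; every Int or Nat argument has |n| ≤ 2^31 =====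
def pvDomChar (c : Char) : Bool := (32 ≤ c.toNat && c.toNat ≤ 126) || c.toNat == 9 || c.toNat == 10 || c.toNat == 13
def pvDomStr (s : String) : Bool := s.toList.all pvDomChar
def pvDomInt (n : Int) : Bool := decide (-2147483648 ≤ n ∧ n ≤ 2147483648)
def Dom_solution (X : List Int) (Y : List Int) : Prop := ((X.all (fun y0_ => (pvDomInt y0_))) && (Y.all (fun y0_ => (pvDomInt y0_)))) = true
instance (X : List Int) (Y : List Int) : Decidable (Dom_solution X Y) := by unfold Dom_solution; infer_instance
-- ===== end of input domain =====

-- B replaces A's dict-counting with inline running-argmax by a sort-then-scan: sort the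
-- reduced ratio tuples and take the longest run of equal neighbours (objective: alternative).

-- ===== PORT A =====
-- math.gcd(x, y) = gcd of absolute values = (Int.gcd x y : Int); defaultdict reads 'cnt[k]'
-- are ported as getD _ _ 0 (value-exact; the key insertion a defaultdict read performs is
-- never observable through the returned value). 'max_i == -1' is Python str-vs-int: always False.
def solution (X : List Int) (Y : List Int) : Int :=
  let st := (X.zip Y).foldl
    (fun (s : PySem.Dict String Int × String) (p : Int × Int) =>
      let g : Int := (Int.gcd p.1 p.2 : Nat)
      let line : String := PySem.Int.toStr (PySem.Int.floordiv p.1 g) ++ "+"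
                             ++ PySem.Int.toStr (PySem.Int.floordiv p.2 g)
      let cnt := s.1.modify line 0 (· + 1)
      if cnt.getD line 0 > cnt.getD s.2 0 then (cnt, line) else (cnt, s.2))
    (PySem.Dict.empty, "")
  st.1.getD st.2 0

-- ===== PORT B =====
-- keys.sort() on tuples (Python's lexicographic tuple order) is ported as PySem.List.sorted2
def solution_alt (X : List Int) (Y : List Int) : Int :=
  let keys := (X.zip Y).foldl
    (fun (acc : List (Int × Int)) (p : Int × Int) =>
      let g : Int := (Int.gcd p.1 p.2 : Nat)
      acc ++ [(PySem.Int.floordiv p.1 g, PySem.Int.floordiv p.2 g)])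
    []
  let skeys := PySem.List.sorted2 keys (fun p => p.1) (fun p => p.2) false
  let st := skeys.foldl
    (fun (s : Option (Int × Int) × Int × Int) (k : Int × Int) =>
      let run := if some k = s.1 then s.2.1 + 1 else 1
      (some k, run, max s.2.2 run))
    (none, 0, 0)
  st.2.2

-- ===== PRECONDITION & SPEC =====
-- Pre_ excludes exactly the inputs where some zipped pair is (0, 0): there gcd = 0 and x // gcd
-- raises ZeroDivisionError in A (and in B alike).
def Pre_solution (X : List Int) (Y : List Int) : Prop :=
  ∀ p ∈ X.zip Y, ¬(p.1 = 0 ∧ p.2 = 0)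
instance (X : List Int) (Y : List Int) : Decidable (Pre_solution X Y) := by unfold Pre_solution; infer_instance
def pvWitness_solution : List Int × List Int := ([2, -4, 1, 2], [4, 8, 3, 4])
def Spec_solution (X : List Int) (Y : List Int) (out : Int) : Prop := out = solution_alt X Y
instance (X : List Int) (Y : List Int) (out : Int) : Decidable (Spec_solution X Y out) := by unfold Spec_solution; infer_instance

-- ===== CLAIM (what is proved, stated in full; the proofs are below) =====
def Claim_equal_solution : Prop := ∀ (X : List Int) (Y : List Int), Dom_solution X Y → Pre_solution X Y → Spec_solution X Y (solution X Y)

-- ===== LEMMAS AND PROOFS =====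

-- the reduced pair and its string encoding
def pvRed (p : Int × Int) : Int × Int :=
  let g : Int := (Int.gcd p.1 p.2 : Nat)
  (PySem.Int.floordiv p.1 g, PySem.Int.floordiv p.2 g)

def pvEnc (q : Int × Int) : String :=
  PySem.Int.toStr q.1 ++ "+" ++ PySem.Int.toStr q.2

-- decimal digit lists
def pvNatChars (n : Nat) : List Char :=
  if n = 0 then ['0'] else ((Nat.digits 10 n).map Nat.digitChar).reverse

lemma pvToDigitsCore_eq (f : Nat) : ∀ (n : Nat) (acc : List Char), 0 < n → n < f →
    Nat.toDigitsCore 10 f n acc = ((Nat.digits 10 n).map Nat.digitChar).reverse ++ acc := by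
  induction f with
  | zero => intro n acc h1 h2; omega
  | succ f ih =>
    intro n acc h1 h2
    rw [Nat.toDigitsCore]
    rw [Nat.digits_def' (by norm_num) h1]
    by_cases h : n / 10 = 0
    · simp [h]
    · have hlt : n / 10 < f := by omega
      simp only [h, if_false]
      rw [ih (n / 10) _ (by omega) hlt]
      simp

lemma pvToDigits_eq (n : Nat) : Nat.toDigits 10 n = pvNatChars n := by
  by_cases h : n = 0
  · subst h; decide
  · rw [Nat.toDigits, pvToDigitsCore_eq (n + 1) n [] (by omega) (by omega), pvNatChars]
    simp [h]

lemma pvMem_natChars {c : Char} {n : Nat} (h : c ∈ pvNatChars n) :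
    ∃ d, d < 10 ∧ c = Nat.digitChar d := by
  unfold pvNatChars at h
  split_ifs at h with h0
  · exact ⟨0, by omega, by simpa using h⟩
  · simp only [List.mem_reverse, List.mem_map] at h
    obtain ⟨d, hd, rfl⟩ := h
    exact ⟨d, Nat.digits_lt_base (by norm_num) hd, rfl⟩

lemma pvDigitChar_inj {a b : Nat} (ha : a < 10) (hb : b < 10)
    (h : Nat.digitChar a = Nat.digitChar b) : a = b := by
  interval_cases a <;> interval_cases b <;> simp_all [Nat.digitChar]

lemma pvNatChars_inj {a b : Nat} (h : pvNatChars a = pvNatChars b) : a = b := by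
  unfold pvNatChars at h
  have key : ∀ m : Nat, m ≠ 0 → ((Nat.digits 10 m).map Nat.digitChar).reverse ≠ ['0'] := by
    intro m hm hc
    have hne : Nat.digits 10 m ≠ [] := Nat.digits_ne_nil_iff_ne_zero.mpr hm
    have hmap : (Nat.digits 10 m).map Nat.digitChar = ['0'] := by
      have := congrArg List.reverse hc; simpa using this
    obtain ⟨d, hd⟩ : ∃ d, Nat.digits 10 m = [d] := by
      cases hdig : Nat.digits 10 m with
      | nil => exact absurd hdig hne
      | cons x t =>
        rw [hdig] at hmap; simp at hmap
        exact ⟨x, by simp [hmap.2]⟩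
    rw [hd] at hmap
    have hd0 : Nat.digitChar d = '0' := by simpa using hmap
    have hd10 : d < 10 := Nat.digits_lt_base (by norm_num) (by rw [hd]; simp)
    have hdz : d = 0 := pvDigitChar_inj hd10 (by norm_num) hd0
    have h0 := Nat.ofDigits_digits 10 m
    rw [hd, hdz] at h0
    simp [Nat.ofDigits] at h0
    exact hm h0.symm
  split_ifs at h with h1 h2 h2
  · omega
  · exact absurd h.symm (key b h2)
  · exact absurd h (key a h1)
  · -- both positive
    have hmap : (Nat.digits 10 a).map Nat.digitChar = (Nat.digits 10 b).map Nat.digitChar := by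
      have := congrArg List.reverse h; simpa using this
    have : Nat.digits 10 a = Nat.digits 10 b := by
      have hlen := congrArg List.length hmap
      simp only [List.length_map] at hlen
      apply List.ext_getElem hlen
      intro i hi1 hi2
      have := congrArg (fun l => l[i]?) hmap
      simp only [List.getElem?_map] at this
      rw [List.getElem?_eq_getElem hi1, List.getElem?_eq_getElem hi2] at this
      simp only [Option.map_some] at this
      exact pvDigitChar_inj (Nat.digits_lt_base (by norm_num) (List.getElem_mem _))
        (Nat.digits_lt_base (by norm_num) (List.getElem_mem _)) (by simpa using this)
    exact Nat.digits_inj_iff.mp this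

lemma pvMem_toChars {c : Char} {n : Int} (h : c ∈ PySem.Int.toChars n) :
    c = '-' ∨ ∃ d, d < 10 ∧ c = Nat.digitChar d := by
  unfold PySem.Int.toChars at h
  split_ifs at h with hn
  · rw [List.mem_cons] at h
    rcases h with h | h
    · exact Or.inl h
    · exact Or.inr (pvMem_natChars (by rwa [pvToDigits_eq] at h))
  · exact Or.inr (pvMem_natChars (by rwa [pvToDigits_eq] at h))

lemma pvPlus_not_mem_toChars (n : Int) : '+' ∉ PySem.Int.toChars n := by
  intro h
  rcases pvMem_toChars h with h | ⟨d, hd, h⟩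
  · simp at h
  · interval_cases d <;> simp_all [Nat.digitChar]

lemma pvDash_not_mem_natChars (n : Nat) : '-' ∉ pvNatChars n := by
  intro h
  obtain ⟨d, hd, h⟩ := pvMem_natChars h
  interval_cases d <;> simp_all [Nat.digitChar]

lemma pvToChars_inj {a b : Int} (h : PySem.Int.toChars a = PySem.Int.toChars b) : a = b := by
  unfold PySem.Int.toChars at h
  simp only [pvToDigits_eq] at h
  split_ifs at h with h1 h2 h2
  · rw [List.cons.injEq] at h
    have := pvNatChars_inj h.2
    omega
  · exact absurd (h ▸ List.mem_cons_self) (pvDash_not_mem_natChars _)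
  · exact absurd (h ▸ List.mem_cons_self) (pvDash_not_mem_natChars _)
  · have := pvNatChars_inj h
    omega

-- splitting at the unique '+' separator
lemma pvSplit_unique : ∀ (s1 s2 t1 t2 : List Char), '+' ∉ s1 → '+' ∉ s2 →
    s1 ++ '+' :: t1 = s2 ++ '+' :: t2 → s1 = s2 ∧ t1 = t2 := by
  intro s1
  induction s1 with
  | nil =>
    intro s2 t1 t2 _ hs2 h
    cases s2 with
    | nil => simpa using h
    | cons c s2 =>
      simp at h
      exact absurd (h.1 ▸ List.mem_cons_self) hs2
  | cons c s1 ih =>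
    intro s2 t1 t2 hs1 hs2 h
    cases s2 with
    | nil =>
      simp at h
      exact absurd (h.1 ▸ List.mem_cons_self) hs1
    | cons c' s2 =>
      simp only [List.cons_append, List.cons.injEq] at h
      obtain ⟨rfl, h⟩ := h
      obtain ⟨rfl, rfl⟩ := ih s2 t1 t2 (fun hm => hs1 (List.mem_cons_of_mem _ hm))
        (fun hm => hs2 (List.mem_cons_of_mem _ hm)) h
      exact ⟨rfl, rfl⟩

lemma pvEnc_inj : Function.Injective pvEnc := by
  intro q1 q2 h
  unfold pvEnc at h
  have h' : (PySem.Int.toStr q1.1 ++ "+" ++ PySem.Int.toStr q1.2).toList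
      = (PySem.Int.toStr q2.1 ++ "+" ++ PySem.Int.toStr q2.2).toList := by rw [h]
  simp only [String.toList_append, PySem.Int.toList_toStr] at h'
  have hplus : ("+" : String).toList = ['+'] := rfl
  rw [hplus] at h'
  simp only [List.append_assoc, List.singleton_append] at h'
  obtain ⟨h1, h2⟩ := pvSplit_unique _ _ _ _ (pvPlus_not_mem_toChars _) (pvPlus_not_mem_toChars _) h'
  exact Prod.ext (pvToChars_inj h1) (pvToChars_inj h2)

lemma pvEnc_ne_empty (q : Int × Int) : pvEnc q ≠ "" := by
  intro h
  have : (pvEnc q).toList = [] := by rw [h]; rfl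
  unfold pvEnc at this
  simp only [String.toList_append, PySem.Int.toList_toStr] at this
  have : '+' ∈ ([] : List Char) := by
    rw [← this]
    exact List.mem_append_left _ (List.mem_append_right _ (by decide))
  simp at this

-- m is a most-frequent element of P ('' for empty P)
def pvMaxSpec (P : List String) (m : String) : Prop :=
  (P = [] ∧ m = "") ∨ (m ∈ P ∧ ∀ k ∈ P, P.count k ≤ P.count m)

-- A's loop body, named
def pvStep (s : PySem.Dict String Int × String) (p : Int × Int) :
    PySem.Dict String Int × String :=
  let g : Int := (Int.gcd p.1 p.2 : Nat)
  let line : String := PySem.Int.toStr (PySem.Int.floordiv p.1 g) ++ "+"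
                         ++ PySem.Int.toStr (PySem.Int.floordiv p.2 g)
  let cnt := s.1.modify line 0 (· + 1)
  if cnt.getD line 0 > cnt.getD s.2 0 then (cnt, line) else (cnt, s.2)

lemma pvSolution_eq (X Y : List Int) :
    solution X Y = (((X.zip Y).foldl pvStep (PySem.Dict.counter [], "")).1).getD
      (((X.zip Y).foldl pvStep (PySem.Dict.counter [], "")).2) 0 := rfl

lemma pvStep_eq (s : PySem.Dict String Int × String) (p : Int × Int) : pvStep s p =
    if (s.1.modify (pvEnc (pvRed p)) 0 (· + 1)).getD (pvEnc (pvRed p)) 0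
        > (s.1.modify (pvEnc (pvRed p)) 0 (· + 1)).getD s.2 0
    then (s.1.modify (pvEnc (pvRed p)) 0 (· + 1), pvEnc (pvRed p))
    else (s.1.modify (pvEnc (pvRed p)) 0 (· + 1), s.2) := rfl

lemma pvCount_append_ne {α : Type} [BEq α] [LawfulBEq α] {k e : α} (P : List α) (h : k ≠ e) :
    (P ++ [e]).count k = P.count k := by
  simp [List.count_append, List.count_cons, beq_iff_eq]
  exact fun he => h he.symm

lemma pvStep_inv (P : List String) (m : String) (p : Int × Int) (hinv : pvMaxSpec P m) :
    pvStep (PySem.Dict.counter P, m) p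
      = (PySem.Dict.counter (P ++ [pvEnc (pvRed p)]),
         (pvStep (PySem.Dict.counter P, m) p).2)
    ∧ pvMaxSpec (P ++ [pvEnc (pvRed p)]) (pvStep (PySem.Dict.counter P, m) p).2 := by
  have hcnt : (PySem.Dict.counter P).modify (pvEnc (pvRed p)) 0 (· + 1)
      = PySem.Dict.counter (P ++ [pvEnc (pvRed p)]) :=
    (PySem.Dict.counter_append_singleton P (pvEnc (pvRed p))).symm
  rw [pvStep_eq]
  simp only [hcnt, PySem.Dict.getD_counter, gt_iff_lt]
  set e := pvEnc (pvRed p) with he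
  set Q := P ++ [e] with hQ
  have hce : Q.count e = P.count e + 1 := by simp [hQ, List.count_append]
  by_cases hc : ((Q.count m : Int)) < ((Q.count e : Int))
  · rw [if_pos hc]
    refine ⟨rfl, ?_⟩
    show pvMaxSpec Q e
    refine Or.inr ⟨List.mem_append_right _ (by simp), ?_⟩
    intro k hk
    by_cases hke : k = e
    · simp [hke]
    · have hkP : k ∈ P := by
        rcases List.mem_append.mp hk with h | h
        · exact h
        · simp at h; exact absurd h hke
      have h1 : Q.count k = P.count k := pvCount_append_ne P hke
      have h2 : P.count k ≤ P.count m := by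
        rcases hinv with ⟨rfl, _⟩ | ⟨_, hb⟩
        · simp at hkP
        · exact hb k hkP
      have h3 : P.count m ≤ Q.count m := by
        simp [hQ, List.count_append]
      have h4 : Q.count m < Q.count e := by exact_mod_cast hc
      omega
  · rw [if_neg hc]
    refine ⟨rfl, ?_⟩
    show pvMaxSpec Q m
    rcases hinv with ⟨rfl, rfl⟩ | ⟨hm, hb⟩
    · exfalso
      have heemp : e ≠ "" := by rw [he]; exact pvEnc_ne_empty _
      have h0 : Q.count "" = 0 := by
        apply List.count_eq_zero_of_not_mem
        simp [hQ]
        exact fun hcon => heemp hcon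
      rw [h0, hce] at hc
      exact hc (by exact_mod_cast Nat.succ_pos (List.count e []))
    · refine Or.inr ⟨List.mem_append_left _ hm, ?_⟩
      intro k hk
      by_cases hke : k = e
      · subst hke
        exact_mod_cast not_lt.mp hc
      · have hkP : k ∈ P := by
          rcases List.mem_append.mp hk with h | h
          · exact h
          · simp at h; exact absurd h hke
        have h1 : Q.count k = P.count k := pvCount_append_ne P hke
        have h2 : P.count k ≤ P.count m := hb k hkP
        have h3 : P.count m ≤ Q.count m := by simp [hQ, List.count_append]
        omega

lemma pvFoldA_inv : ∀ (pairs : List (Int × Int)) (P : List String) (m : String),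
    pvMaxSpec P m →
    (pairs.foldl pvStep (PySem.Dict.counter P, m)).1
        = PySem.Dict.counter (P ++ pairs.map (fun p => pvEnc (pvRed p)))
      ∧ pvMaxSpec (P ++ pairs.map (fun p => pvEnc (pvRed p)))
          (pairs.foldl pvStep (PySem.Dict.counter P, m)).2 := by
  intro pairs
  induction pairs with
  | nil => intro P m h; simpa using h
  | cons p rest ih =>
    intro P m h
    obtain ⟨h1, h2⟩ := pvStep_inv P m p h
    rw [List.foldl_cons, h1]
    have := ih (P ++ [pvEnc (pvRed p)]) _ h2
    simpa [List.append_assoc] using this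

lemma pvA_char (X Y : List Int) : ∃ m,
    pvMaxSpec ((X.zip Y).map (fun p => pvEnc (pvRed p))) m ∧
    solution X Y = (((X.zip Y).map (fun p => pvEnc (pvRed p))).count m : Int) := by
  have h := pvFoldA_inv (X.zip Y) [] "" (Or.inl ⟨rfl, rfl⟩)
  simp only [List.nil_append] at h
  refine ⟨_, h.2, ?_⟩
  rw [pvSolution_eq, h.1, PySem.Dict.getD_counter]

-- ===== B-side: sorted list, longest run of equal neighbours =====

-- the lexicographic key Python uses when sorting tuples
def pvKey (p : Int × Int) : Int ×ₗ Int := toLex p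

def pvLe (a b : Int × Int) : Prop := pvKey a ≤ pvKey b

-- B's scan body, named
def pvStepB (s : Option (Int × Int) × Int × Int) (k : Int × Int) :
    Option (Int × Int) × Int × Int :=
  let run := if some k = s.1 then s.2.1 + 1 else 1
  (some k, run, max s.2.2 run)

lemma pvKeys_eq (X Y : List Int) :
    (X.zip Y).foldl
      (fun (acc : List (Int × Int)) (p : Int × Int) =>
        let g : Int := (Int.gcd p.1 p.2 : Nat)
        acc ++ [(PySem.Int.floordiv p.1 g, PySem.Int.floordiv p.2 g)])
      [] = (X.zip Y).map pvRed := by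
  rw [PySem.List.foldl_append_singleton_eq_map, List.nil_append]
  rfl

lemma pvSolutionAlt_eq (X Y : List Int) :
    solution_alt X Y =
      ((PySem.List.sorted2 ((X.zip Y).map pvRed) (fun p => p.1) (fun p => p.2) false).foldl
        pvStepB (none, 0, 0)).2.2 := by
  simp only [solution_alt]
  rw [pvKeys_eq]
  rfl

lemma pvBefore_eq :
    (fun (a b : Int × Int) =>
        decide (a.1 < b.1) || (!decide (b.1 < a.1) && decide (a.2 < b.2)))
      = (fun (a b : Int × Int) => decide (pvKey a < pvKey b)) := by
  funext a b
  by_cases h1 : a.1 < b.1 <;> by_cases h2 : b.1 < a.1 <;> by_cases h3 : a.2 < b.2 <;>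
    simp [pvKey, Prod.Lex.lt_iff, h1, h2, h3] <;> omega

lemma pvFold_insertBy_pairwise : ∀ (xs acc : List (Int × Int)),
    acc.Pairwise pvLe →
    (xs.foldl (fun acc x =>
        PySem.List.insertBy (fun a b => decide (pvKey a < pvKey b)) x acc) acc).Pairwise pvLe := by
  intro xs
  induction xs with
  | nil => intro acc h; simpa using h
  | cons x xs ih =>
    intro acc h
    exact ih _ (PySem.List.insertBy_pairwise_le pvKey x acc h)

lemma pvSorted2_pairwise (L : List (Int × Int)) :
    (PySem.List.sorted2 L (fun p => p.1) (fun p => p.2) false).Pairwise pvLe := by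
  show (L.foldl (fun acc x => PySem.List.insertBy _ x acc) []).Pairwise pvLe
  rw [show (fun (a b : Int × Int) =>
      decide (a.1 < b.1) || (!decide (b.1 < a.1) && decide (a.2 < b.2)))
      = (fun (a b : Int × Int) => decide (pvKey a < pvKey b)) from pvBefore_eq]
  exact pvFold_insertBy_pairwise L [] (List.Pairwise.nil)

lemma pvLe_refl (a : Int × Int) : pvLe a a := le_refl _

lemma pvLe_antisymm {a b : Int × Int} (h1 : pvLe a b) (h2 : pvLe b a) : a = b := by
  have : pvKey a = pvKey b := le_antisymm h1 h2
  exact congrArg ofLex this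

-- the scan invariant: prev is the le-maximal processed key, run its count, best the max count
lemma pvScan_inv : ∀ (rest P : List (Int × Int)) (p : Int × Int) (best : Int),
    p ∈ P → (∀ q ∈ P, pvLe q p) →
    (∀ q ∈ P, (P.count q : Int) ≤ best) → (∃ q ∈ P, (P.count q : Int) = best) →
    (P ++ rest).Pairwise pvLe →
    (∀ q ∈ P ++ rest, ((P ++ rest).count q : Int)
        ≤ (rest.foldl pvStepB (some p, (P.count p : Int), best)).2.2)
    ∧ (∃ q ∈ P ++ rest, ((P ++ rest).count q : Int)
        = (rest.foldl pvStepB (some p, (P.count p : Int), best)).2.2) := by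
  intro rest
  induction rest with
  | nil =>
    intro P p best _ _ hub hex _
    simp only [List.append_nil, List.foldl_nil]
    exact ⟨hub, hex⟩
  | cons k rest ih =>
    intro P p best hp hmax hub hex hsorted
    have hPk : ∀ q ∈ P, pvLe q k := by
      rw [List.pairwise_append] at hsorted
      exact fun q hq => hsorted.2.2 q hq k List.mem_cons_self
    have hsorted' : ((P ++ [k]) ++ rest).Pairwise pvLe := by
      rwa [List.append_assoc, List.singleton_append]
    have hQmax : ∀ q ∈ P ++ [k], pvLe q k := by
      intro q hq
      rcases List.mem_append.mp hq with h | h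
      · exact hPk q h
      · simp at h; rw [h]; exact pvLe_refl k
    have hkQ : k ∈ P ++ [k] := List.mem_append_right _ (by simp)
    rw [List.foldl_cons]
    by_cases hkp : k = p
    · -- same key as previous: the run grows by one
      have hckk : ((P ++ [k]).count k : Int) = (P.count k : Int) + 1 := by
        simp [List.count_append]
      have hstep : pvStepB (some p, (P.count p : Int), best) k
          = (some k, ((P ++ [k]).count k : Int),
             max best ((P ++ [k]).count k : Int)) := by
        subst hkp
        simp [pvStepB, List.count_append]
      rw [hstep]
      have hub' : ∀ q ∈ P ++ [k], ((P ++ [k]).count q : Int)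
          ≤ max best ((P ++ [k]).count k : Int) := by
        intro q hq
        by_cases hqk : q = k
        · rw [hqk]; exact le_max_right _ _
        · rw [pvCount_append_ne P hqk]
          have hqP : q ∈ P := by
            rcases List.mem_append.mp hq with h | h
            · exact h
            · simp at h; exact absurd h hqk
          exact le_trans (hub q hqP) (le_max_left _ _)
      have hex' : ∃ q ∈ P ++ [k], ((P ++ [k]).count q : Int)
          = max best ((P ++ [k]).count k : Int) := by
        by_cases hble : best ≤ ((P ++ [k]).count k : Int)
        · exact ⟨k, hkQ, (max_eq_right hble).symm⟩
        · obtain ⟨q0, hq0, hq0e⟩ := hex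
          have hq0k : q0 ≠ k := by
            intro h; rw [h] at hq0e; omega
          refine ⟨q0, List.mem_append_left _ hq0, ?_⟩
          rw [pvCount_append_ne P hq0k, max_eq_left (not_le.mp hble).le]
          exact hq0e
      have := ih (P ++ [k]) k _ hkQ hQmax hub' hex' hsorted'
      rwa [List.append_assoc, List.singleton_append] at this
    · -- a strictly new key: it cannot have occurred before
      have hkP : k ∉ P := fun hkin => hkp (pvLe_antisymm (hmax k hkin) (hPk p hp))
      have hck1 : (P ++ [k]).count k = 1 := by
        simp [List.count_append, List.count_eq_zero_of_not_mem hkP]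
      have hne : ¬ (some k = some p) := by simpa using hkp
      have hstep : pvStepB (some p, (P.count p : Int), best) k
          = (some k, ((P ++ [k]).count k : Int),
             max best ((P ++ [k]).count k : Int)) := by
        simp [pvStepB, hne, hck1]
      rw [hstep]
      have hub' : ∀ q ∈ P ++ [k], ((P ++ [k]).count q : Int)
          ≤ max best ((P ++ [k]).count k : Int) := by
        intro q hq
        by_cases hqk : q = k
        · rw [hqk]; exact le_max_right _ _
        · rw [pvCount_append_ne P hqk]
          have hqP : q ∈ P := by
            rcases List.mem_append.mp hq with h | h
            · exact h
            · simp at h; exact absurd h hqk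
          exact le_trans (hub q hqP) (le_max_left _ _)
      have hex' : ∃ q ∈ P ++ [k], ((P ++ [k]).count q : Int)
          = max best ((P ++ [k]).count k : Int) := by
        obtain ⟨q0, hq0, hq0e⟩ := hex
        have hpos : 0 < P.count q0 := List.count_pos_iff.mpr hq0
        have h1 : (1 : Int) ≤ best := by omega
        have hq0k : q0 ≠ k := fun h => hkP (h ▸ hq0)
        refine ⟨q0, List.mem_append_left _ hq0, ?_⟩
        have hmx : max best (((P ++ [k]).count k : Nat) : Int) = best := by
          rw [hck1, Nat.cast_one]
          exact max_eq_left h1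
        rw [pvCount_append_ne P hq0k, hmx]
        exact hq0e
      have := ih (P ++ [k]) k _ hkQ hQmax hub' hex' hsorted'
      rwa [List.append_assoc, List.singleton_append] at this

-- B computes the maximum multiplicity of the sorted key list
lemma pvB_char (S : List (Int × Int)) (hsort : S.Pairwise pvLe) :
    (S = [] ∧ (S.foldl pvStepB (none, 0, 0)).2.2 = 0)
    ∨ ((∀ q ∈ S, (S.count q : Int) ≤ (S.foldl pvStepB (none, 0, 0)).2.2)
        ∧ (∃ q ∈ S, (S.count q : Int) = (S.foldl pvStepB (none, 0, 0)).2.2)) := by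
  cases S with
  | nil => exact Or.inl ⟨rfl, rfl⟩
  | cons k S' =>
    refine Or.inr ?_
    have hstep : pvStepB (none, 0, 0) k = (some k, ([k].count k : Int), (1 : Int)) := by
      simp [pvStepB]
    rw [List.foldl_cons, hstep]
    have h := pvScan_inv S' [k] k 1 (by simp) (by simp [pvLe_refl])
      (by simp) (⟨k, by simp⟩) (by simpa using hsort)
    rwa [List.singleton_append] at h

-- ===== VERDICT (by name: the statement is the Claim_ definition above) =====
theorem solution_spec : Claim_equal_solution := by
  unfold Claim_equal_solution Spec_solution
  intro X Y _ _
  obtain ⟨m, hspec, hA⟩ := pvA_char X Y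
  set L := (X.zip Y).map pvRed with hL
  have hE : (X.zip Y).map (fun p => pvEnc (pvRed p)) = L.map pvEnc := by
    rw [hL, List.map_map]
    rfl
  rw [hE] at hspec hA
  rw [hA, pvSolutionAlt_eq]
  set S := PySem.List.sorted2 L (fun p => p.1) (fun p => p.2) false with hS
  have hperm : S.Perm L := PySem.List.sorted2_perm L _ _ false
  have hcS : ∀ q : Int × Int, S.count q = L.count q := fun q => hperm.count_eq q
  rcases pvB_char S (pvSorted2_pairwise L) with ⟨hSnil, hB0⟩ | ⟨hub, q, hq, hqe⟩
  · have hLnil : L = [] := by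
      rw [hSnil] at hperm
      exact hperm.symm.eq_nil
    rcases hspec with ⟨_, rfl⟩ | ⟨hm, _⟩
    · rw [hB0, hLnil]
      simp
    · exfalso; rw [hLnil] at hm; simp at hm
  · have hcnt : ∀ r : Int × Int, (L.map pvEnc).count (pvEnc r) = L.count r :=
      fun r => List.count_map_of_injective L pvEnc pvEnc_inj r
    rcases hspec with ⟨hnil, _⟩ | ⟨hm, hmaxm⟩
    · exfalso
      have hLnil : L = [] := by simpa using hnil
      rw [hLnil] at hperm
      rw [hperm.eq_nil] at hq
      simp at hq
    · obtain ⟨r, hrL, rfl⟩ := List.mem_map.mp hm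
      rw [hcnt]
      have h1 : (L.count r : Int) ≤ (S.foldl pvStepB (none, 0, 0)).2.2 := by
        have hrS : r ∈ S := hperm.mem_iff.mpr hrL
        have := hub r hrS
        rwa [hcS r] at this
      have h2 : (S.foldl pvStepB (none, 0, 0)).2.2 ≤ (L.count r : Int) := by
        have hqL : q ∈ L := hperm.mem_iff.mp hq
        have := hmaxm (pvEnc q) (List.mem_map_of_mem hqL)
        rw [hcnt, hcnt] at this
        rw [← hqe, hcS q]
        exact_mod_cast this
      omega
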